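-- pv_equiv track=rewrite | github.com/projectious-work/processkit | context/skills/_lib/processkit/gateway/naming.py | registered_name
-- ===== SOURCE A (Python) =====
-- from typing import Any
--
-- def registered_name(
--     entry: dict[str, Any],
--     used_names: set[str],
--     duplicate_index: int,
-- ) -> str:
--     original_name = entry["source_tool"]
--     if duplicate_index == 0 and original_name not in used_names:
--         return original_name
--
--     prefix = entry["source_skill"].replace("-", "_")
--     candidate = f"{prefix}__{original_name}"
--     if candidate not in used_names:
--         return candidate
--
--     suffix = 2
--     while f"{candidate}_{suffix}" in used_names:
--         suffix += 1
--     return f"{candidate}_{suffix}"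
-- ===== SOURCE B (Python) =====
-- def _suffix_rest(pre, name):
--     """The part of `name` after `pre`, if it is a canonical decimal >= 2, else None."""
--     if not name.startswith(pre):
--         return None
--     r = name[len(pre):]
--     if r.isdigit() and r[0] != "0" and r != "1":
--         return r
--     return None
--
--
-- def registered_name(entry, used_names, duplicate_index):
--     original = entry["source_tool"]
--     if duplicate_index == 0 and original not in used_names:
--         return original
--     base = entry["source_skill"].replace("-", "_") + "__" + original
--     if base not in used_names:
--         return base
--     # Harvest the numeric suffixes already taken (as canonical decimal strings),
--     # sort them in numeric order via the (length, lexicographic) key, then scan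
--     # once for the smallest free suffix starting at 2.
--     pre = base + "_"
--     taken = sorted({r for n in used_names if (r := _suffix_rest(pre, n)) is not None},
--                    key=lambda r: (len(r), r))
--     s = 2
--     for r in taken:
--         t = str(s)
--         if r == t:
--             s += 1
--         elif (len(r), r) > (len(t), t):
--             break
--     return pre + str(s)
-- ===== Notes on version B (the rewrite author's own statement) =====
-- stated objective: alternative
-- what changed: Instead of A's generate-and-test probing (format base_2, base_3, ... and test each against the set), B computes the suffix from the data: one pass over used_names harvests the already-taken canonical numeric suffixes of the base, sorts them in numeric order, and a single mex scan yields the least free suffix >= 2.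
import Mathlib
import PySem

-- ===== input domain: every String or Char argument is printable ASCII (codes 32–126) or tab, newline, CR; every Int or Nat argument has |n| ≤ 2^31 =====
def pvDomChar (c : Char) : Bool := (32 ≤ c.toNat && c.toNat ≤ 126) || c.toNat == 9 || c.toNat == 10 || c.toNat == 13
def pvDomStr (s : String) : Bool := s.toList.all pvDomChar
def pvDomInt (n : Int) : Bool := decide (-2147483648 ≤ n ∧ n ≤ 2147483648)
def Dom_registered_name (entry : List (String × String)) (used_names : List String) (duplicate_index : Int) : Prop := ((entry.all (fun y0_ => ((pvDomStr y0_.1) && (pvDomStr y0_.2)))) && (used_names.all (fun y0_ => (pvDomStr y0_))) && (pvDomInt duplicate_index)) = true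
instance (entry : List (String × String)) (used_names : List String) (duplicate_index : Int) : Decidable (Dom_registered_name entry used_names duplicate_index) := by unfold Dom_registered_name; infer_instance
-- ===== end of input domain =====

-- B replaces A's generate-and-test loop (probe base_2, base_3, … against the set) by a
-- data-driven computation: one pass harvests the taken numeric suffixes, sorts them
-- numerically, and a single mex scan yields the least free suffix (objective: alternative).

-- ===== PORT A =====

-- dict lookup (first match in the association list), KeyError = none
def rnGet? (entry : List (String × String)) (k : String) : Option String :=
  (entry.find? (fun p => p.1 == k)).map (·.2)

-- A's while loop: bump suffix while the numbered candidate is used, then return it.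
-- Fuel used_names.length + 1 is enough: the numbered candidates are pairwise distinct.
def rnWhile (used_names : List String) (candidate : String) (suffix : Int) : Nat → String
  | 0 => candidate ++ "_" ++ PySem.Int.toStr suffix
  | n + 1 =>
    if used_names.contains (candidate ++ "_" ++ PySem.Int.toStr suffix) then
      rnWhile used_names candidate (suffix + 1) n
    else
      candidate ++ "_" ++ PySem.Int.toStr suffix

def registered_name (entry : List (String × String)) (used_names : List String) (duplicate_index : Int) : String :=
  let original_name := (rnGet? entry "source_tool").getD ""
  if duplicate_index == 0 && !used_names.contains original_name then
    original_name
  else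
    let pfx := PySem.Str.replace ((rnGet? entry "source_skill").getD "") "-" "_"
    let candidate := pfx ++ "__" ++ original_name
    if !used_names.contains candidate then
      candidate
    else
      rnWhile used_names candidate 2 (used_names.length + 1)

-- ===== PORT B =====

-- _suffix_rest: the part of `name` after `pre` if it is a canonical decimal ≥ 2, else None
-- (r[0] is only compared when r.isdigit() holds, so r is nonempty: head? is exact there).
def rnSuffix? (pre : List Char) (name : List Char) : Option (List Char) :=
  if PySem.Chars.startswith name pre then
    let r := PySem.Chars.slice name (some (pre.length : Int)) none
    if PySem.Chars.strIsdigit r && !(r.head? == some '0') && !(r == ['1']) then some r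
    else none
  else none

-- the single mex scan: for r in taken: t = str(s); if r == t: s += 1
-- elif (len(r), r) > (len(t), t): break
def rnScan : List (List Char) → Int → Int
  | [], s => s
  | r :: rs, s =>
    let t := PySem.Int.toChars s
    if r == t then rnScan rs (s + 1)
    else if t.length < r.length || (t.length == r.length && decide (t < r)) then s
    else rnScan rs s

def registered_name_alt (entry : List (String × String)) (used_names : List String) (duplicate_index : Int) : String :=
  let original := (rnGet? entry "source_tool").getD ""
  if duplicate_index == 0 && !used_names.contains original then
    original
  else
    let base := PySem.Str.replace ((rnGet? entry "source_skill").getD "") "-" "_" ++ "__" ++ original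
    if !used_names.contains base then
      base
    else
      let pre := base.toList ++ ['_']
      let taken := PySem.List.sorted2
        (PySem.Set.ofList (used_names.filterMap (fun n => rnSuffix? pre n.toList)))
        (fun r => r.length) (fun r => r) false
      base ++ "_" ++ PySem.Int.toStr (rnScan taken 2)

-- ===== PRECONDITION & SPEC =====
-- Pre_ excludes exactly the inputs where the Python A raises KeyError: a missing
-- "source_tool" key, or a missing "source_skill" key when the first early return does not fire.
def Pre_registered_name (entry : List (String × String)) (used_names : List String) (duplicate_index : Int) : Prop :=
  (rnGet? entry "source_tool").isSome = true ∧
  ((duplicate_index = 0 ∧ used_names.contains ((rnGet? entry "source_tool").getD "") = false) ∨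
    (rnGet? entry "source_skill").isSome = true)
instance (entry : List (String × String)) (used_names : List String) (duplicate_index : Int) : Decidable (Pre_registered_name entry used_names duplicate_index) := by unfold Pre_registered_name; infer_instance

def pvWitness_registered_name : (List (String × String)) × List String × Int :=
  ([("source_tool", "t"), ("source_skill", "a-b")], ["t", "a_b__t", "a_b__t_2"], 1)

def Spec_registered_name (entry : List (String × String)) (used_names : List String) (duplicate_index : Int) (out : String) : Prop := out = registered_name_alt entry used_names duplicate_index
instance (entry : List (String × String)) (used_names : List String) (duplicate_index : Int) (out : String) : Decidable (Spec_registered_name entry used_names duplicate_index out) := by unfold Spec_registered_name; infer_instance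

-- ===== CLAIM (what is proved, stated in full; the proofs are below) =====
def Claim_equal_registered_name : Prop := ∀ (entry : List (String × String)) (used_names : List String) (duplicate_index : Int), Dom_registered_name entry used_names duplicate_index → Pre_registered_name entry used_names duplicate_index → Spec_registered_name entry used_names duplicate_index (registered_name entry used_names duplicate_index)

-- ===== LEMMAS AND PROOFS =====

-- `Canon r`: a string of decimal digits with no leading zero (the shape of str(m), m ≥ 1)
def rnDigits (r : List Char) : Prop := ∀ c ∈ r, ('0' ≤ c ∧ c ≤ '9')
def Canon (r : List Char) : Prop := rnDigits r ∧ r ≠ [] ∧ r.head? ≠ some '0'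

-- the numeric value of a digit string (proof-side only)
def rnVal (r : List Char) : Nat := r.foldl (fun a c => 10 * a + (c.toNat - 48)) 0

-- the before-relation sorted2 uses for the key (length, lexicographic)
def rnBefore (a b : List Char) : Bool :=
  decide (a.length < b.length) || (!decide (b.length < a.length) && decide (a < b))

theorem char_toNat_inj (c d : Char) (h : c.toNat = d.toNat) : c = d :=
  Char.ext (UInt32.toNat_inj.1 h)

theorem char_lt_iff (c d : Char) : c < d ↔ c.toNat < d.toNat := ⟨fun h => h, fun h => h⟩

theorem rnVal_foldl (t : List Char) (a : Nat) :
    t.foldl (fun a c => 10 * a + (c.toNat - 48)) a = a * 10 ^ t.length + rnVal t := by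
  induction t generalizing a with
  | nil => simp [rnVal]
  | cons c t ih =>
    simp only [List.foldl_cons, List.length_cons, rnVal]
    rw [ih, ih (10 * 0 + (c.toNat - 48))]
    ring

theorem rnVal_cons (c : Char) (t : List Char) :
    rnVal (c :: t) = (c.toNat - 48) * 10 ^ t.length + rnVal t := by
  simp only [rnVal, List.foldl_cons]
  rw [rnVal_foldl]; simp [rnVal]

theorem rnVal_append_singleton (a : List Char) (d : Char) :
    rnVal (a ++ [d]) = 10 * rnVal a + (d.toNat - 48) := by
  simp only [rnVal, List.foldl_append, List.foldl_cons, List.foldl_nil]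

theorem rnVal_lt (r : List Char) (h : rnDigits r) : rnVal r < 10 ^ r.length := by
  induction r with
  | nil => simp [rnVal]
  | cons c t ih =>
    rw [rnVal_cons]
    have hc : 48 ≤ c.toNat ∧ c.toNat ≤ 57 := ⟨(h c (by simp)).1, (h c (by simp)).2⟩
    have ht := ih (fun x hx => h x (by simp [hx]))
    calc (c.toNat - 48) * 10 ^ t.length + rnVal t
        < (c.toNat - 48) * 10 ^ t.length + 10 ^ t.length := by omega
      _ = (c.toNat - 48 + 1) * 10 ^ t.length := by ring
      _ ≤ 10 * 10 ^ t.length := Nat.mul_le_mul_right _ (by omega)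
      _ = 10 ^ (t.length + 1) := by ring
      _ = 10 ^ (c :: t).length := by simp

theorem rnVal_ge (r : List Char) (h : Canon r) : 10 ^ (r.length - 1) ≤ rnVal r := by
  obtain ⟨hd, hne, hh⟩ := h
  cases r with
  | nil => simp at hne
  | cons c t =>
    rw [rnVal_cons]
    have hc := hd c (by simp)
    have h0 : c ≠ '0' := by simpa using hh
    have hc' : 48 ≤ c.toNat ∧ c.toNat ≤ 57 := ⟨hc.1, hc.2⟩
    have h48 : c.toNat ≠ 48 := fun he => h0 (char_toNat_inj c '0' (by rw [he]; decide))
    have h1 : 1 ≤ c.toNat - 48 := by omega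
    calc 10 ^ ((c :: t).length - 1) = 1 * 10 ^ t.length := by simp
      _ ≤ (c.toNat - 48) * 10 ^ t.length := Nat.mul_le_mul_right _ h1
      _ ≤ _ := Nat.le_add_right _ _

theorem digitChar_toNat_sub (c : Char) (h : '0' ≤ c ∧ c ≤ '9') :
    Nat.digitChar (c.toNat - 48) = c := by
  have h1 : 48 ≤ c.toNat := h.1
  have h2 : c.toNat ≤ 57 := h.2
  apply char_toNat_inj
  interval_cases hn : c.toNat <;> simp_all <;> rfl

theorem digitChar_val (k : Nat) (h : k < 10) : (Nat.digitChar k).toNat = k + 48 := by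
  interval_cases k <;> decide

theorem rnVal_toDigits (m : Nat) : rnVal (Nat.toDigits 10 m) = m := by
  induction m using Nat.strong_induction_on with
  | _ m ih =>
    rw [Nat.toDigits_eq_if (by norm_num)]
    by_cases h : m < 10
    · simp only [h, if_true]
      have : rnVal [Nat.digitChar m] = (Nat.digitChar m).toNat - 48 := by
        simp [rnVal]
      rw [this, digitChar_val m h]
      omega
    · simp only [h, if_false]
      rw [rnVal_append_singleton, ih (m / 10) (by omega), digitChar_val (m % 10) (by omega)]
      omega

theorem digits_toDigits (m : Nat) : rnDigits (Nat.toDigits 10 m) := by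
  intro c hc
  have := Nat.isDigit_of_mem_toDigits (by norm_num) (by norm_num) hc
  simp [Char.isDigit] at this
  exact ⟨this.1, this.2⟩

theorem head_toDigits (m : Nat) (h : 1 ≤ m) : (Nat.toDigits 10 m).head? ≠ some '0' := by
  induction m using Nat.strong_induction_on with
  | _ m ih =>
    rw [Nat.toDigits_eq_if (by norm_num)]
    by_cases hlt : m < 10
    · simp only [hlt, if_true, List.head?_cons, ne_eq, Option.some.injEq]
      intro he
      have := digitChar_val m hlt
      rw [he] at this
      simp [Char.toNat] at this; omega
    · simp only [hlt, if_false]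
      have hne : Nat.toDigits 10 (m / 10) ≠ [] :=
        List.ne_nil_of_length_pos Nat.length_toDigits_pos
      rw [List.head?_append_of_ne_nil _ hne]
      exact ih (m / 10) (by omega) (by omega)

theorem canon_toDigits (m : Nat) (h : 1 ≤ m) : Canon (Nat.toDigits 10 m) :=
  ⟨digits_toDigits m, List.ne_nil_of_length_pos Nat.length_toDigits_pos, head_toDigits m h⟩

theorem toDigits_rnVal (r : List Char) (h : Canon r) : Nat.toDigits 10 (rnVal r) = r := by
  induction r using List.reverseRecOn with
  | nil => exact absurd rfl h.2.1
  | append_singleton a d ih =>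
    obtain ⟨hd, -, hh⟩ := h
    have hdd : '0' ≤ d ∧ d ≤ '9' := hd d (by simp)
    have h48 : 48 ≤ d.toNat ∧ d.toNat ≤ 57 := ⟨hdd.1, hdd.2⟩
    have hdv : d.toNat - 48 < 10 := by omega
    rw [rnVal_append_singleton]
    have h0 : rnVal [] = 0 := rfl
    rcases eq_or_ne a [] with rfl | hane
    · simp only [List.nil_append] at *
      rw [h0, Nat.toDigits_eq_if (by norm_num), if_pos (by omega)]
      simp [digitChar_toNat_sub d hdd]
    · have hca : Canon a := by
        refine ⟨fun c hc => hd c (by simp [hc]), hane, ?_⟩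
        rwa [List.head?_append_of_ne_nil _ hane] at hh
      have hva : 1 ≤ rnVal a := by
        have := rnVal_ge a hca
        have : 0 < 10 ^ (a.length - 1) := by positivity
        omega
      rw [Nat.toDigits_eq_if (by norm_num), if_neg (by omega)]
      have h1 : (10 * rnVal a + (d.toNat - 48)) / 10 = rnVal a := by omega
      have h2 : (10 * rnVal a + (d.toNat - 48)) % 10 = d.toNat - 48 := by omega
      rw [h1, h2, ih hca, digitChar_toNat_sub d hdd]

theorem canon_val_inj (a b : List Char) (ha : Canon a) (hb : Canon b)
    (h : rnVal a = rnVal b) : a = b := by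
  rw [← toDigits_rnVal a ha, ← toDigits_rnVal b hb, h]

theorem lex_val_forward : ∀ (r t : List Char), rnDigits r → rnDigits t →
    r.length = t.length → r < t → rnVal r < rnVal t := by
  intro r
  induction r with
  | nil =>
    intro t _ _ hl hlt
    cases t with
    | nil => simp at hlt
    | cons d ds => simp at hl
  | cons c cs ih =>
    intro t hr ht hl hlt
    cases t with
    | nil => simp at hl
    | cons d ds =>
      have hlen : cs.length = ds.length := by simpa using hl
      have hc' : 48 ≤ c.toNat ∧ c.toNat ≤ 57 := ⟨(hr c (by simp)).1, (hr c (by simp)).2⟩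
      have hd' : 48 ≤ d.toNat ∧ d.toNat ≤ 57 := ⟨(ht d (by simp)).1, (ht d (by simp)).2⟩
      rw [List.cons_lt_cons_iff] at hlt
      rw [rnVal_cons, rnVal_cons, hlen]
      have hcs := rnVal_lt cs (fun x hx => hr x (by simp [hx]))
      have hds := rnVal_lt ds (fun x hx => ht x (by simp [hx]))
      rw [hlen] at hcs
      rcases hlt with hlt | ⟨rfl, hlt⟩
      · have h1 : c.toNat - 48 + 1 ≤ d.toNat - 48 := by
          have := (char_lt_iff c d).1 hlt; omega
        calc (c.toNat - 48) * 10 ^ ds.length + rnVal cs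
            < (c.toNat - 48) * 10 ^ ds.length + 10 ^ ds.length := by omega
          _ = (c.toNat - 48 + 1) * 10 ^ ds.length := by ring
          _ ≤ (d.toNat - 48) * 10 ^ ds.length := Nat.mul_le_mul_right _ h1
          _ ≤ _ := Nat.le_add_right _ _
      · have := ih ds (fun x hx => hr x (by simp [hx])) (fun x hx => ht x (by simp [hx])) hlen hlt
        omega

theorem lex_iff_val (r t : List Char) (hr : rnDigits r) (ht : rnDigits t)
    (hl : r.length = t.length) : r < t ↔ rnVal r < rnVal t := by
  constructor
  · exact lex_val_forward r t hr ht hl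
  · intro hv
    rcases lt_trichotomy r t with h | rfl | h
    · exact h
    · omega
    · exact absurd (lex_val_forward t r ht hr hl.symm h) (by omega)

theorem val_lt_of_len_lt (t r : List Char) (ht : rnDigits t) (hr : Canon r)
    (h : t.length < r.length) : rnVal t < rnVal r := by
  calc rnVal t < 10 ^ t.length := rnVal_lt t ht
    _ ≤ 10 ^ (r.length - 1) := Nat.pow_le_pow_right (by norm_num) (by omega)
    _ ≤ rnVal r := rnVal_ge r hr

theorem key_iff_val (t r : List Char) (ht : Canon t) (hr : Canon r) :
    (t.length < r.length || (t.length == r.length && decide (t < r))) = true ↔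
      rnVal t < rnVal r := by
  simp only [Bool.or_eq_true, decide_eq_true_eq, Bool.and_eq_true, beq_iff_eq]
  constructor
  · rintro (h | ⟨hl, h⟩)
    · exact val_lt_of_len_lt t r ht.1 hr h
    · exact (lex_iff_val t r ht.1 hr.1 hl).1 h
  · intro hv
    rcases lt_trichotomy t.length r.length with h | h | h
    · exact Or.inl h
    · exact Or.inr ⟨h, (lex_iff_val t r ht.1 hr.1 h).2 hv⟩
    · exact absurd (val_lt_of_len_lt r t hr.1 ht h) (by omega)

theorem rnBefore_iff_val (a b : List Char) (ha : Canon a) (hb : Canon b) :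
    rnBefore a b = true ↔ rnVal a < rnVal b := by
  unfold rnBefore
  rcases lt_trichotomy a.length b.length with h | h | h
  · simp only [h, decide_true, Bool.true_or, true_iff]
    exact val_lt_of_len_lt a b ha.1 hb h
  · simp only [h, lt_irrefl, decide_false, Bool.false_or, Bool.not_false, Bool.true_and,
      decide_eq_true_eq]
    exact lex_iff_val a b ha.1 hb.1 h
  · have h1 : ¬ a.length < b.length := by omega
    simp only [h1, decide_false, Bool.false_or, h, decide_true, Bool.not_true, Bool.false_and,
      Bool.false_eq_true, false_iff]
    have := val_lt_of_len_lt b a hb.1 ha h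
    omega

theorem rnSuffix?_eq_some (pre name r : List Char) :
    rnSuffix? pre name = some r ↔ (name = pre ++ r ∧ Canon r ∧ r ≠ ['1']) := by
  unfold rnSuffix?
  by_cases hsw : PySem.Chars.startswith name pre
  · rw [if_pos hsw]
    obtain ⟨suf, rfl⟩ := (PySem.Chars.startswith_iff name pre).1 hsw
    have hdrop : PySem.Chars.slice (pre ++ suf) (some (pre.length : Int)) none = suf := by
      simp [PySem.List.slice_from_natCast]
    rw [hdrop]
    have hCiff : (PySem.Chars.strIsdigit suf && !(suf.head? == some '0') && !(suf == ['1'])) = true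
        ↔ (Canon suf ∧ suf ≠ ['1']) := by
      simp only [Bool.and_eq_true, Bool.not_eq_true', beq_eq_false_iff_ne,
        PySem.Chars.strIsdigit, List.all_eq_true, Canon, rnDigits,
        PySem.Chars.isdigit, decide_eq_true_eq, ne_eq, List.isEmpty_eq_false_iff]
      tauto
    by_cases hC : (PySem.Chars.strIsdigit suf && !(suf.head? == some '0') && !(suf == ['1'])) = true
    · rw [if_pos hC]
      have hcanon := hCiff.1 hC
      constructor
      · rintro h
        cases h
        exact ⟨rfl, hcanon⟩
      · rintro ⟨heq, -⟩
        have : suf = r := by simpa using heq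
        rw [this]
    · rw [if_neg hC]
      constructor
      · intro h; cases h
      · rintro ⟨heq, hc, h1⟩
        have : suf = r := by simpa using heq
        subst this
        exact absurd (hCiff.2 ⟨hc, h1⟩) hC
  · rw [if_neg hsw]
    constructor
    · intro h; cases h
    · rintro ⟨rfl, -⟩
      exact absurd ((PySem.Chars.startswith_iff _ _).2 ⟨r, rfl⟩) hsw

theorem insertBy_perm (bf : List Char → List Char → Bool) (x : List Char)
    (ys : List (List Char)) : (PySem.List.insertBy bf x ys).Perm (x :: ys) := by
  induction ys with
  | nil => rfl
  | cons y ys ih =>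
    have heq : PySem.List.insertBy bf x (y :: ys) =
        if bf x y then x :: y :: ys else y :: PySem.List.insertBy bf x ys := rfl
    rw [heq]
    by_cases hb : bf x y = true
    · rw [if_pos hb]
    · rw [if_neg hb]
      exact (ih.cons y).trans (List.Perm.swap x y ys)

theorem insertBy_sorted (x : List Char) (ys : List (List Char))
    (hCx : Canon x) (hCy : ∀ y ∈ ys, Canon y)
    (hne : ∀ y ∈ ys, rnVal y ≠ rnVal x)
    (hp : ys.Pairwise (fun a b => rnVal a < rnVal b)) :
    (PySem.List.insertBy rnBefore x ys).Pairwise (fun a b => rnVal a < rnVal b) := by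
  induction ys with
  | nil => simp [PySem.List.insertBy]
  | cons y ys ih =>
    have heq : PySem.List.insertBy rnBefore x (y :: ys) =
        if rnBefore x y then x :: y :: ys else y :: PySem.List.insertBy rnBefore x ys := rfl
    rw [heq]
    rcases List.pairwise_cons.1 hp with ⟨hyall, hpys⟩
    by_cases hb : rnBefore x y = true
    · rw [if_pos hb]
      have hxy : rnVal x < rnVal y := (rnBefore_iff_val x y hCx (hCy y (by simp))).1 hb
      refine List.pairwise_cons.2 ⟨?_, hp⟩
      intro z hz
      rcases List.mem_cons.1 hz with rfl | hz
      · exact hxy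
      · exact lt_trans hxy (hyall z hz)
    · rw [if_neg hb]
      have hyx : rnVal y < rnVal x := by
        have hnv := (rnBefore_iff_val x y hCx (hCy y (by simp))).not.1 hb
        have := hne y (by simp)
        omega
      refine List.pairwise_cons.2 ⟨?_, ?_⟩
      · intro z hz
        rcases (PySem.List.mem_insertBy rnBefore x z ys).1 hz with rfl | hz
        · exact hyx
        · exact hyall z hz
      · exact ih (fun y hy => hCy y (by simp [hy])) (fun y hy => hne y (by simp [hy])) hpys

theorem foldl_insertBy_sorted (L acc : List (List Char))
    (hCL : ∀ r ∈ L, Canon r) (hCacc : ∀ r ∈ acc, Canon r)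
    (hnd : ∀ a ∈ acc ++ L, ∀ b ∈ acc ++ L, a ≠ b → rnVal a ≠ rnVal b)
    (hndL : (acc ++ L).Nodup)
    (hpacc : acc.Pairwise (fun a b => rnVal a < rnVal b)) :
    (L.foldl (fun acc x => PySem.List.insertBy rnBefore x acc) acc).Pairwise
      (fun a b => rnVal a < rnVal b) := by
  induction L generalizing acc with
  | nil => simpa using hpacc
  | cons x L ih =>
    simp only [List.foldl_cons]
    have hCx : Canon x := hCL x (by simp)
    have hmem : ∀ z ∈ PySem.List.insertBy rnBefore x acc, z = x ∨ z ∈ acc :=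
      fun z hz => (PySem.List.mem_insertBy rnBefore x z acc).1 hz
    have hxnacc : x ∉ acc := by
      intro hx
      rw [List.nodup_append] at hndL
      exact hndL.2.2 x hx x (by simp) rfl
    apply ih
    · intro r hr; exact hCL r (by simp [hr])
    · intro r hr
      rcases hmem r hr with rfl | hr
      · exact hCx
      · exact hCacc r hr
    · intro a ha b hb hab
      apply hnd <;> try assumption
      · rcases List.mem_append.1 ha with ha | ha
        · rcases hmem a ha with rfl | ha
          · simp
          · simp [ha]
        · simp [ha]
      · rcases List.mem_append.1 hb with hb | hb
        · rcases hmem b hb with rfl | hb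
          · simp
          · simp [hb]
        · simp [hb]
    · have hperm : (PySem.List.insertBy rnBefore x acc ++ L).Perm (acc ++ x :: L) :=
        ((insertBy_perm rnBefore x acc).append_right L).trans List.perm_middle.symm
      exact hperm.nodup_iff.2 hndL
    · apply insertBy_sorted x acc hCx hCacc
      · intro y hy hv
        exact hxnacc (by rwa [canon_val_inj y x (hCacc y hy) hCx hv] at hy)
      · exact hpacc

theorem mem_taken (pre : List Char) (used : List String) (r : List Char) :
    r ∈ PySem.List.sorted2
        (PySem.Set.ofList (used.filterMap (fun n => rnSuffix? pre n.toList)))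
        (fun r => r.length) (fun r => r) false ↔
      ∃ n ∈ used, n.toList = pre ++ r ∧ Canon r ∧ r ≠ ['1'] := by
  rw [(PySem.List.sorted2_perm _ _ _ _).mem_iff, PySem.Set.mem_ofList, List.mem_filterMap]
  constructor
  · rintro ⟨n, hn, hs⟩
    obtain ⟨he, hc⟩ := (rnSuffix?_eq_some pre n.toList r).1 hs
    exact ⟨n, hn, he, hc⟩
  · rintro ⟨n, hn, he, hc⟩
    exact ⟨n, hn, (rnSuffix?_eq_some pre n.toList r).2 ⟨he, hc⟩⟩

theorem taken_canon (pre : List Char) (used : List String) :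
    ∀ r ∈ PySem.List.sorted2
        (PySem.Set.ofList (used.filterMap (fun n => rnSuffix? pre n.toList)))
        (fun r => r.length) (fun r => r) false,
      Canon r ∧ 2 ≤ rnVal r := by
  intro r hr
  obtain ⟨n, -, -, hc, h1⟩ := (mem_taken pre used r).1 hr
  refine ⟨hc, ?_⟩
  have h10 : 10 ^ (r.length - 1) ≤ rnVal r := rnVal_ge r hc
  have hne : 1 ≤ rnVal r :=
    le_trans (Nat.one_le_pow _ _ (by norm_num)) h10
  by_contra hlt
  have hv1 : rnVal r = 1 := by omega
  have : r = ['1'] := by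
    have := toDigits_rnVal r hc
    rw [hv1] at this
    rw [← this]; rfl
  exact h1 this

theorem taken_pairwise (pre : List Char) (used : List String) :
    (PySem.List.sorted2
        (PySem.Set.ofList (used.filterMap (fun n => rnSuffix? pre n.toList)))
        (fun r => r.length) (fun r => r) false).Pairwise (fun a b => rnVal a < rnVal b) := by
  have hca : ∀ r ∈ PySem.Set.ofList (used.filterMap (fun n => rnSuffix? pre n.toList)), Canon r := by
    intro r hr
    rw [PySem.Set.mem_ofList, List.mem_filterMap] at hr
    obtain ⟨n, -, hs⟩ := hr
    exact ((rnSuffix?_eq_some pre n.toList r).1 hs).2.1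
  have hnd := PySem.Set.nodup_ofList (used.filterMap (fun n => rnSuffix? pre n.toList))
  have heq : PySem.List.sorted2
      (PySem.Set.ofList (used.filterMap (fun n => rnSuffix? pre n.toList)))
      (fun r => r.length) (fun r => r) false =
    (PySem.Set.ofList (used.filterMap (fun n => rnSuffix? pre n.toList))).foldl
      (fun acc x => PySem.List.insertBy rnBefore x acc) [] := rfl
  rw [heq]
  apply foldl_insertBy_sorted _ [] hca (by simp)
  · intro a ha b hb hab hv
    simp only [List.nil_append] at ha hb
    exact hab (canon_val_inj a b (hca a ha) (hca b hb) hv)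
  · simp only [List.nil_append]; exact hnd
  · simp

theorem toChars_nonneg (v : Int) (h : 0 ≤ v) :
    PySem.Int.toChars v = Nat.toDigits 10 v.toNat := by
  simp [PySem.Int.toChars, not_lt.2 h]

theorem canon_toChars (v : Int) (h : 2 ≤ v) :
    Canon (PySem.Int.toChars v) ∧ PySem.Int.toChars v ≠ ['1'] ∧
      rnVal (PySem.Int.toChars v) = v.toNat := by
  rw [toChars_nonneg v (by omega)]
  refine ⟨canon_toDigits _ (by omega), ?_, rnVal_toDigits _⟩
  intro he
  have := rnVal_toDigits v.toNat
  rw [he] at this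
  have h1 : rnVal ['1'] = 1 := rfl
  omega

theorem name_toList (base : String) (v : Int) :
    (base ++ "_" ++ PySem.Int.toStr v).toList = (base.toList ++ ['_']) ++ PySem.Int.toChars v := by
  simp [PySem.Int.toList_toStr]

theorem contains_iff_mem_taken (used : List String) (base : String) (v : Int) (hv : 2 ≤ v) :
    used.contains (base ++ "_" ++ PySem.Int.toStr v) = true ↔
      PySem.Int.toChars v ∈ PySem.List.sorted2
        (PySem.Set.ofList (used.filterMap (fun n => rnSuffix? (base.toList ++ ['_']) n.toList)))
        (fun r => r.length) (fun r => r) false := by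
  obtain ⟨hc, h1, -⟩ := canon_toChars v hv
  rw [List.contains_iff_mem, mem_taken]
  constructor
  · intro h
    exact ⟨_, h, by rw [name_toList], hc, h1⟩
  · rintro ⟨n, hn, he, -⟩
    have : n = base ++ "_" ++ PySem.Int.toStr v := by
      apply String.toList_inj.1
      rw [he, name_toList]
    rwa [← this]

-- the main induction: A's probing loop lands on the suffix B's mex scan computes
theorem rnWhile_eq_scan (used : List String) (base : String) (L : List (List Char))
    (s : Int) (fuel : Nat)
    (hs : 2 ≤ s)
    (hmem : ∀ v : Int, s ≤ v → (used.contains (base ++ "_" ++ PySem.Int.toStr v) = true ↔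
      PySem.Int.toChars v ∈ L))
    (hcanon : ∀ r ∈ L, Canon r ∧ s ≤ (rnVal r : Int))
    (hpw : L.Pairwise (fun a b => rnVal a < rnVal b))
    (hfuel : L.length < fuel) :
    rnWhile used base s fuel = base ++ "_" ++ PySem.Int.toStr (rnScan L s) := by
  induction L generalizing s fuel with
  | nil =>
    have hnc : used.contains (base ++ "_" ++ PySem.Int.toStr s) ≠ true := by
      intro hcon
      rw [hmem s le_rfl] at hcon
      simp at hcon
    cases fuel with
    | zero => rfl
    | succ n =>
      rw [rnScan, rnWhile, if_neg hnc]
  | cons r rs ih =>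
    obtain ⟨fuel, rfl⟩ : ∃ n, fuel = n + 1 :=
      ⟨fuel - 1, by omega⟩
    obtain ⟨hcr, hsr⟩ := hcanon r (by simp)
    obtain ⟨hct, ht1, htv⟩ := canon_toChars s hs
    rcases List.pairwise_cons.1 hpw with ⟨hrall, hprs⟩
    by_cases he : rnVal r = s.toNat
    · -- r is exactly str(s): both sides advance
      have hre : r = PySem.Int.toChars s := canon_val_inj _ _ hcr hct (by omega)
      have hcon : used.contains (base ++ "_" ++ PySem.Int.toStr s) = true := by
        rw [hmem s le_rfl]; simp [hre]
      rw [rnWhile, if_pos hcon, rnScan]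
      simp only [hre, beq_self_eq_true, if_true]
      apply ih (s + 1) fuel (by omega)
      · intro v hv
        rw [hmem v (by omega), List.mem_cons]
        constructor
        · rintro (hveq | hv'); swap
          · exact hv'
          · exfalso
            have hv2 := (canon_toChars v (by omega)).2.2
            rw [hveq, hre, htv] at hv2
            omega
        · exact Or.inr
      · intro x hx
        refine ⟨(hcanon x (by simp [hx])).1, ?_⟩
        have := hrall x hx
        omega
      · exact hprs
      · exact Nat.lt_of_succ_lt_succ hfuel
    · -- str(s) is free: both sides stop at s
      have hsltr : s < (rnVal r : Int) := lt_of_le_of_ne hsr (by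
        intro hx; exact he (by omega))
      have hnotmem : PySem.Int.toChars s ∉ r :: rs := by
        intro hmem'
        rcases List.mem_cons.1 hmem' with hveq | hv'
        · exact he (by rw [← hveq, htv])
        · have := hrall _ hv'
          rw [htv] at this
          omega
      have hnc : used.contains (base ++ "_" ++ PySem.Int.toStr s) ≠ true := by
        intro hcon
        exact hnotmem ((hmem s le_rfl).1 hcon)
      rw [rnWhile, if_neg hnc, rnScan]
      have hrne : (r == PySem.Int.toChars s) = false := by
        simp only [beq_eq_false_iff_ne, ne_eq]
        intro hx
        exact hnotmem (by simp [← hx])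
      rw [hrne]
      simp only [Bool.false_eq_true, if_false]
      rw [if_pos ((key_iff_val _ _ hct hcr).2 (by omega))]

-- ===== VERDICT (by name: the statement is the Claim_ definition above) =====
theorem registered_name_spec : Claim_equal_registered_name := by
  intro entry used_names duplicate_index _dom _pre
  unfold Spec_registered_name registered_name registered_name_alt
  by_cases h0 : duplicate_index = 0 ∧ (rnGet? entry "source_tool").getD "" ∉ used_names
  · simp [h0]
  · by_cases h2 : (PySem.Str.replace ((rnGet? entry "source_skill").getD "") "-" "_" ++ "__" ++
        (rnGet? entry "source_tool").getD "") ∈ used_names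
    · simp only [h0, h2, Bool.and_eq_true, beq_iff_eq, Bool.not_eq_eq_eq_not, Bool.not_true,
        List.contains_eq_mem, decide_eq_false_iff_not, if_false]
      apply rnWhile_eq_scan
      · norm_num
      · intro v hv; exact contains_iff_mem_taken _ _ v hv
      · intro r hr
        have h := taken_canon _ used_names r hr
        exact ⟨h.1, by exact_mod_cast h.2⟩
      · exact taken_pairwise _ _
      · calc (PySem.List.sorted2
              (PySem.Set.ofList (used_names.filterMap (fun n => rnSuffix?
                ((PySem.Str.replace ((rnGet? entry "source_skill").getD "") "-" "_" ++ "__" ++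
                  (rnGet? entry "source_tool").getD "").toList ++ ['_']) n.toList)))
              (fun r => r.length) (fun r => r) false).length
            = (PySem.Set.ofList (used_names.filterMap _)).length :=
              (PySem.List.sorted2_perm _ _ _ _).length_eq
          _ ≤ (used_names.filterMap _).length := PySem.Set.length_ofList_le _
          _ ≤ used_names.length := List.length_filterMap_le _ _
          _ < used_names.length + 1 := Nat.lt_succ_self _
    · simp [h0, h2]
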